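-- pv_equiv track=rewrite | github.com/KnotOnPurpose/ParkingFunctions | Ploting.py | tableau_vis
-- ===== SOURCE A (Python) =====
-- def tableau_vis(partition, format):
--     """
--     Given a partition returns a visualization or shortened version of the partition
--     Inputs:
--     partition - the partition to format
--     format - either "*" to format the partition as a tableau of astrix
--                 or  "m" to format the partition with math shorthand
--     """
--     if format == "*":
--         s = ""
--         for p in partition:
--             s += "*"*p + "\n"
--         s = s[:-1]
--         return s
--
--     if format == "m":
--         s = ""
--
--         counts = {}
--         for i in range(len(partition)):
--             if partition[i] in counts:
--                 counts[partition[i]] += 1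
--             else:
--                 counts[partition[i]] = 1
--
--         L = list(counts.keys())
--         L.sort()
--
--         for i in range(len(L)):
--             s += str(L[i])
--             if counts[L[i]] != 1:
--                 s += "^" + str(counts[L[i]]) + " "
--         return "$" + s + "$"
-- ===== SOURCE B (Python) =====
-- def tableau_vis(partition, format):
--     """
--     Given a partition returns a visualization or shortened version of the partition
--     (re-implementation: sort the partition and run-length-scan consecutive equal values;
--     no counting dict).
--     """
--     if format == "*":
--         return "\n".join("*" * p for p in partition)
--     if format != "m":
--         return None
--     xs = sorted(partition)
--     pieces = []
--     i = 0
--     n = len(xs)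
--     while i < n:
--         j = i + 1
--         while j < n and xs[j] == xs[i]:
--             j += 1
--         c = j - i
--         pieces.append(str(xs[i]) if c == 1 else str(xs[i]) + "^" + str(c) + " ")
--         i = j
--     return "$" + "".join(pieces) + "$"
-- ===== Notes on version B (the rewrite author's own statement) =====
-- stated objective: alternative
-- what changed: The 'm' branch no longer builds a counting dict over the unsorted list and then sorts its keys: B sorts the whole partition once and does a single run-length scan of consecutive equal values (two-pointer while loop), emitting value and run length; the '*' branch becomes a '\n'.join of rows instead of fold-then-chop-last-char.
import Mathlib
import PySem

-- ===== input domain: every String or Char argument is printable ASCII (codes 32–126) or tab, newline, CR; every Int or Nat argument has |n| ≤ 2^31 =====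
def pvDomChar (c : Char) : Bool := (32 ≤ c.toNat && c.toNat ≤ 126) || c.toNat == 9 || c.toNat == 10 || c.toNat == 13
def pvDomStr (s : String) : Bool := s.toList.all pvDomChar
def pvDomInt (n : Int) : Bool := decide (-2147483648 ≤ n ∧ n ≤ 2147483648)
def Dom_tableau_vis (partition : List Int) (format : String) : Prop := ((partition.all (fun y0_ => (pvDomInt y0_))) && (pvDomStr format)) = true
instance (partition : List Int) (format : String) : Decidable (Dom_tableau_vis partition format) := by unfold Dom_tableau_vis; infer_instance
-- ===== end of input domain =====

-- B replaces A's counting dict by a sort-then-run-length scan of consecutive equal values; objective: alternative. A = B everywhere.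

-- ===== PORT A =====
def tableau_vis (partition : List Int) (format : String) : Option String :=
  if format = "*" then
    -- s = ""; for p in partition: s += "*"*p + "\n"
    let s : List Char := partition.foldl (fun s p => s ++ PySem.List.pyRepeat ['*'] p ++ ['\n']) []
    -- s = s[:-1]
    some (String.ofList (PySem.List.slice s none (some (-1))))
  else if format = "m" then
    -- counts = {}; for i in range(len(partition)): …  (partition[i] is always in range here)
    let counts : PySem.Dict Int Int :=
      (PySem.List.pyRange 0 (PySem.List.len partition)).foldl
        (fun d i =>
          if d.contains (PySem.List.pyGetD partition i 0) then
            d.modify (PySem.List.pyGetD partition i 0) 0 (· + 1)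
          else d.insert (PySem.List.pyGetD partition i 0) 1)
        PySem.Dict.empty
    -- L = list(counts.keys()); L.sort()
    let L := PySem.List.sorted counts.keys (fun x => x) false
    -- for i in range(len(L)): s += str(L[i]); if counts[L[i]] != 1: s += "^" + str(counts[L[i]]) + " "
    let s : List Char :=
      (PySem.List.pyRange 0 (PySem.List.len L)).foldl
        (fun s i =>
          if counts.getD (PySem.List.pyGetD L i 0) 0 ≠ 1 then
            s ++ PySem.Int.toChars (PySem.List.pyGetD L i 0) ++ ['^'] ++
              PySem.Int.toChars (counts.getD (PySem.List.pyGetD L i 0) 0) ++ [' ']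
          else s ++ PySem.Int.toChars (PySem.List.pyGetD L i 0))
        []
    some (String.ofList ('$' :: s ++ ['$']))
  else none

-- ===== PORT B =====
-- the inner while loop 'j = i+1; while j < n and xs[j] == xs[i]: j += 1; c = j - i; …; i = j'
-- advances past the run of values equal to xs[i]: run = takeWhile (= v) of the tail, c = 1 + run.length
def pvRunPieces (xs : List Int) : List (List Char) :=
  match xs with
  | [] => []
  | v :: rest =>
    let c : Int := 1 + (rest.takeWhile (fun x => x == v)).length
    (if c = 1 then PySem.Int.toChars v
     else PySem.Int.toChars v ++ ['^'] ++ PySem.Int.toChars c ++ [' '])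
      :: pvRunPieces (rest.dropWhile (fun x => x == v))
termination_by xs.length
decreasing_by
  simp only [List.length_cons]
  exact Nat.lt_succ_of_le (List.length_dropWhile_le _ _)

def tableau_vis_alt (partition : List Int) (format : String) : Option String :=
  if format = "*" then
    -- "\n".join("*" * p for p in partition)
    some (String.ofList (PySem.Chars.join ['\n'] (partition.map (fun p => PySem.List.pyRepeat ['*'] p))))
  else if format = "m" then
    -- xs = sorted(partition); run-length scan; "$" + "".join(pieces) + "$"
    some (String.ofList ('$' :: PySem.Chars.join [] (pvRunPieces (PySem.List.sorted partition (fun x => x) false)) ++ ['$']))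
  else none

-- ===== PRECONDITION & SPEC =====
def Spec_tableau_vis (partition : List Int) (format : String) (out : Option String) : Prop := out = tableau_vis_alt partition format
instance (partition : List Int) (format : String) (out : Option String) : Decidable (Spec_tableau_vis partition format out) := by unfold Spec_tableau_vis; infer_instance

-- ===== CLAIM (what is proved, stated in full; the proofs are below) =====
def Claim_equal_tableau_vis : Prop := ∀ (partition : List Int) (format : String), Dom_tableau_vis partition format → Spec_tableau_vis partition format (tableau_vis partition format)

-- ===== LEMMAS AND PROOFS =====

-- "".join(parts) is just concatenation
theorem join_nil_sep (parts : List (List Char)) : PySem.Chars.join [] parts = parts.flatten := by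
  induction parts with
  | nil => simp [PySem.Chars.join_nil]
  | cons p rest ih =>
    cases rest with
    | nil => simp [PySem.Chars.join_singleton]
    | cons q t => rw [PySem.Chars.join_cons_cons] at *; simp [ih]

-- the '*' branch: fold-then-drop-trailing-newline equals "\n".join
theorem star_branch (f : Int → List Char) (l : List Int) :
    (l.flatMap (fun p => f p ++ ['\n'])).dropLast = PySem.Chars.join ['\n'] (l.map f) := by
  induction l with
  | nil => simp [PySem.Chars.join_nil]
  | cons x t ih =>
    cases t with
    | nil => simp [PySem.Chars.join_singleton]
    | cons y t' =>
      have hne : (List.flatMap (fun p => f p ++ ['\n']) (y :: t')) ≠ [] := by simp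
      rw [List.flatMap_cons, List.dropLast_append_of_ne_nil hne, ih]
      simp only [List.map_cons]
      rw [PySem.Chars.join_cons_cons]

-- A's counting loop builds exactly Counter(partition)
theorem counts_eq (partition : List Int) :
    (partition.foldl
      (fun (d : PySem.Dict Int Int) v => if d.contains v = true then d.modify v 0 (· + 1) else d.insert v 1)
      PySem.Dict.empty) = PySem.Dict.counter partition := by
  rw [PySem.Dict.counter_eq_foldl]
  apply PySem.List.foldl_congr_mem
  intro d v _
  by_cases h : d.contains v = true
  · simp [h]
  · simp only [Bool.not_eq_true] at h
    simp [h, PySem.Dict.modify, PySem.Dict.getD_of_not_contains _ _ h]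

-- the piece B emits for a run of c copies of v (and A emits for key v with count c)
def pvPiece (v c : Int) : List Char :=
  if c = 1 then PySem.Int.toChars v
  else PySem.Int.toChars v ++ ['^'] ++ PySem.Int.toChars c ++ [' ']

-- run-length scan of a sorted list = one piece per distinct value (first occurrences), with its count
theorem runPieces_sorted (xs : List Int) (h : xs.Pairwise (· ≤ ·)) :
    pvRunPieces xs = (PySem.List.dedup xs).map (fun v => pvPiece v (xs.count v)) := by
  induction xs using pvRunPieces.induct with
  | case1 => simp [pvRunPieces]
  | case2 v rest ih =>
    rw [List.pairwise_cons] at h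
    obtain ⟨hv, hrest⟩ := h
    have hsplit : rest.takeWhile (fun x => x == v) ++ rest.dropWhile (fun x => x == v) = rest :=
      List.takeWhile_append_dropWhile
    have hrunv : ∀ x ∈ rest.takeWhile (fun x => x == v), x = v := by
      intro x hx
      have := List.mem_takeWhile_imp hx
      simpa using this
    have hdropgt : ∀ x ∈ rest.dropWhile (fun x => x == v), v < x := by
      intro x hx
      obtain ⟨w, tl, hd⟩ : ∃ w tl, rest.dropWhile (fun x => x == v) = w :: tl :=
        List.exists_cons_of_ne_nil (List.ne_nil_of_mem hx)
      have hwrest : w ∈ rest := (List.dropWhile_sublist _).mem (hd ▸ List.mem_cons_self)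
      have hne : rest.dropWhile (fun x => x == v) ≠ [] := by simp [hd]
      have hwne := List.head_dropWhile_not (fun x => x == v) hne
      simp only [hd, List.head_cons, beq_eq_false_iff_ne, ne_eq] at hwne
      rw [hd] at hx
      have hvw : v < w := lt_of_le_of_ne (hv _ hwrest) (Ne.symm hwne)
      have hpw := List.Pairwise.sublist (List.dropWhile_sublist (fun x => x == v)) hrest
      rw [hd] at hpw
      rcases List.mem_cons.mp hx with rfl | hmem
      · exact hvw
      · exact lt_of_lt_of_le hvw ((List.pairwise_cons.mp hpw).1 x hmem)
    have hvnotdrop : v ∉ rest.dropWhile (fun x => x == v) := by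
      intro hmem; exact absurd (hdropgt v hmem) (lt_irrefl v)
    -- count of v in v :: rest
    have hrestcount : rest.count v = (rest.takeWhile (fun x => x == v)).length := by
      conv_lhs => rw [← hsplit]
      rw [List.count_append, List.count_eq_length.mpr (fun b hb => (hrunv b hb).symm),
          List.count_eq_zero.mpr hvnotdrop]
      simp
    -- dedup (v :: rest) = v :: dedup drop
    have habs : PySem.Set.discard (PySem.Set.ofList rest) v
        = PySem.List.dedup (rest.dropWhile (fun x => x == v)) := by
      conv_lhs => rw [← hsplit]
      simp only [PySem.List.dedup_eq_ofList, PySem.Set.discard]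
      have key : ∀ run, (∀ x ∈ run, x = v) →
          (PySem.Set.ofList (run ++ rest.dropWhile (fun x => x == v))).filter (fun y => !(y == v))
          = (PySem.Set.ofList (rest.dropWhile (fun x => x == v))).filter (fun y => !(y == v)) := by
        intro run
        induction run with
        | nil => simp
        | cons a t iht =>
          intro hall
          have ha : a = v := hall a (List.mem_cons_self)
          subst ha
          rw [List.cons_append, PySem.Set.ofList_cons, List.filter_cons]
          simp only [BEq.rfl, Bool.not_true, Bool.false_eq_true, if_false]
          rw [PySem.Set.discard, List.filter_filter]
          simp only [Bool.and_self]
          exact iht (fun x hx => hall x (List.mem_cons_of_mem _ hx))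
      rw [key _ hrunv]
      apply List.filter_eq_self.mpr
      intro a ha
      have hadrop : a ∈ rest.dropWhile (fun x => x == v) := by
        simpa [PySem.Set.mem_ofList] using ha
      simpa using (hdropgt a hadrop).ne'
    have hded : PySem.List.dedup (v :: rest)
        = v :: PySem.List.dedup (rest.dropWhile (fun x => x == v)) := by
      simp only [PySem.List.dedup_eq_ofList] at habs ⊢
      rw [PySem.Set.ofList_cons, habs]
    rw [pvRunPieces, hded, List.map_cons]
    congr 1
    · rw [pvPiece, List.count_cons_self, hrestcount]
      push_cast
      simp [add_comm]
    · rw [ih (List.Pairwise.sublist (List.dropWhile_sublist (fun x => x == v)) hrest)]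
      apply List.map_congr_left
      intro u hu
      have hudrop : u ∈ rest.dropWhile (fun x => x == v) := (PySem.List.mem_dedup _ _).mp hu
      have huv : v < u := hdropgt u hudrop
      have h1 : (v :: rest).count u = (rest.dropWhile (fun x => x == v)).count u := by
        rw [List.count_cons_of_ne (Ne.symm huv.ne')]
        conv_lhs => rw [← hsplit]
        rw [List.count_append, List.count_eq_zero.mpr, Nat.zero_add]
        intro hmem
        exact absurd (hrunv u hmem) huv.ne'
      rw [h1]

-- set(xs) keeps a subsequence of xs (first occurrences)
theorem ofList_sublist (xs : List Int) : (PySem.Set.ofList xs).Sublist xs := by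
  induction xs using List.reverseRecOn with
  | nil => simp [PySem.Set.ofList]
  | append_singleton t x ih =>
    rw [PySem.Set.ofList_append_singleton, PySem.Set.add_eq_ite]
    split
    · exact ih.trans (List.sublist_append_left t [x])
    · exact List.Sublist.append ih (List.Sublist.refl [x])

-- B's distinct values (first occurrences of sorted(partition)) are A's sorted key list
theorem dedup_sorted_eq (partition : List Int) :
    PySem.List.dedup (PySem.List.sorted partition (fun x => x) false)
      = PySem.List.sorted (PySem.Set.ofList partition) (fun x => x) false := by
  symm
  apply PySem.List.sorted_eq_of_perm_of_pairwise_lt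
  · apply (List.perm_ext_iff_of_nodup (PySem.List.nodup_dedup _) (PySem.Set.nodup_ofList _)).mpr
    intro a
    rw [PySem.List.mem_dedup, PySem.List.mem_sorted, PySem.Set.mem_ofList]
  · have h1 : (PySem.List.dedup (PySem.List.sorted partition (fun x => x) false)).Pairwise (· ≤ ·) := by
      refine List.Pairwise.sublist ?_ (PySem.List.sorted_pairwise partition (fun x => x))
      simpa [PySem.List.dedup_eq_ofList] using ofList_sublist (PySem.List.sorted partition (fun x => x) false)
    have h2 := PySem.List.nodup_dedup (PySem.List.sorted partition (fun x => x) false)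
    exact (h1.and h2).imp (fun h => lt_of_le_of_ne h.1 h.2)

theorem tableau_vis_eq_alt (partition : List Int) (format : String) :
    tableau_vis partition format = tableau_vis_alt partition format := by
  unfold tableau_vis tableau_vis_alt
  by_cases hs : format = "*"
  · subst hs
    simp only [reduceIte, PySem.List.slice_to_neg_one, List.append_assoc]
    rw [PySem.List.foldl_append_eq_flatMap (fun p => PySem.List.pyRepeat ['*'] p ++ ['\n']),
        List.nil_append, star_branch]
  · by_cases hm : format = "m"
    · subst hm
      simp only [if_neg hs, reduceIte]
      have h1 := PySem.List.foldl_pyRange_pyGetD partition 0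
            (fun (d : PySem.Dict Int Int) v => if d.contains v = true then d.modify v 0 (· + 1) else d.insert v 1)
            PySem.Dict.empty (le_refl 0)
      simp only [h1]
      simp only [Int.toNat_zero, List.drop_zero]
      rw [counts_eq, PySem.Dict.keys_counter]
      set L := PySem.List.sorted (PySem.Set.ofList partition) (fun x => x) false with hL
      have h2 := PySem.List.foldl_pyRange_pyGetD L 0
            (fun s v => if (PySem.Dict.counter partition).getD v 0 ≠ 1 then
                s ++ PySem.Int.toChars v ++ ['^'] ++
                  PySem.Int.toChars ((PySem.Dict.counter partition).getD v 0) ++ [' ']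
              else s ++ PySem.Int.toChars v)
            ([] : List Char) (le_refl 0)
      simp only [h2]
      simp only [Int.toNat_zero, List.drop_zero]
      -- B's side: run-length pieces of the sorted list = one pvPiece per key of L
      rw [join_nil_sep,
          runPieces_sorted (PySem.List.sorted partition (fun x => x) false)
            (PySem.List.sorted_pairwise partition (fun x => x)),
          dedup_sorted_eq, ← hL]
      -- counts over sorted(partition) are counts over partition
      have hcnt : ∀ u : Int, (PySem.List.sorted partition (fun x => x) false).count u = partition.count u :=
        fun u => (PySem.List.sorted_perm partition (fun x => x) false).count_eq u
      -- A's loop appends exactly pvPiece v (count v) per v ∈ L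
      rw [PySem.List.foldl_congr_mem L _
            (fun s v => s ++ pvPiece v (partition.count v))
            []
            (by
              intro s v _
              simp only [PySem.Dict.getD_counter, pvPiece]
              by_cases h1 : ((partition.count v : Int)) = 1
              · simp [h1]
              · simp [h1, List.append_assoc])]
      rw [PySem.List.foldl_append_eq_flatMap, List.nil_append, List.flatMap_def]
      have hmap : List.map (fun v => pvPiece v (partition.count v : Int)) L
          = List.map (fun v => pvPiece v (((PySem.List.sorted partition (fun x => x) false).count v : Int))) L :=
        List.map_congr_left (fun u _ => by rw [hcnt u])
      rw [hmap]
    · simp [hs, hm]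

-- ===== VERDICT (by name: the statement is the Claim_ definition above) =====
theorem tableau_vis_spec : Claim_equal_tableau_vis := by
  intro partition format _
  unfold Spec_tableau_vis
  exact tableau_vis_eq_alt partition format
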